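-- pv_equiv track=rewrite | github.com/RahulThennarasu/impasse | backend/app/websockets/v1/negotiation.py | _is_walkaway
-- ===== SOURCE A (Python) =====
-- def _is_walkaway(opponent_response: str) -> bool:
--     """Check if opponent's response indicates they are walking away from the negotiation."""
--     lowered = opponent_response.lower()
--     # Phrases indicating opponent is walking away
--     walkaway_phrases = [
--         "walk away",
--         "walking away",
--         "have to pass",
--         "going to pass",
--         "i'll pass",
--         "i'm going to have to pass",
--         "not going to work",
--         "isn't going to work",
--         "can't make this work",
--         "too far apart",
--         "explore other options",
--         "other options that work better",
--         "pursue other opportunities",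
--         "look elsewhere",
--         "end this conversation",
--         "we're done here",
--         "i'm done",
--         "this conversation is over",
--         "not interested anymore",
--         "no longer interested",
--         "withdrawing my offer",
--         "rescind my offer",
--         "off the table",
--         "taking my business elsewhere",
--     ]
--     return any(phrase in lowered for phrase in walkaway_phrases)
-- ===== SOURCE B (Python) =====
-- _WALKAWAY_BY_FIRST = {
--     "w": ["walk away", "walking away", "we're done here", "withdrawing my offer"],
--     "h": ["have to pass"],
--     "g": ["going to pass"],
--     "i": ["i'll pass", "i'm going to have to pass", "isn't going to work", "i'm done"],
--     "n": ["not going to work", "not interested anymore", "no longer interested"],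
--     "c": ["can't make this work"],
--     "t": ["too far apart", "this conversation is over", "taking my business elsewhere"],
--     "e": ["explore other options", "end this conversation"],
--     "o": ["other options that work better", "off the table"],
--     "p": ["pursue other opportunities"],
--     "l": ["look elsewhere"],
--     "r": ["rescind my offer"],
-- }
--
--
-- def _is_walkaway(opponent_response: str) -> bool:
--     lowered = opponent_response.lower()
--     for i in range(len(lowered)):
--         for phrase in _WALKAWAY_BY_FIRST.get(lowered[i], ()):
--             if lowered.startswith(phrase, i):
--                 return True
--     return False
-- ===== Notes on version B (the rewrite author's own statement) =====
-- stated objective: alternative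
-- what changed: Replaces A's 24 independent whole-string substring scans (one per phrase) by a single left-to-right scan over the lowered text that, at each position, consults a precomputed first-character dispatch dict and tests only the phrases that could start there.
import Mathlib
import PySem

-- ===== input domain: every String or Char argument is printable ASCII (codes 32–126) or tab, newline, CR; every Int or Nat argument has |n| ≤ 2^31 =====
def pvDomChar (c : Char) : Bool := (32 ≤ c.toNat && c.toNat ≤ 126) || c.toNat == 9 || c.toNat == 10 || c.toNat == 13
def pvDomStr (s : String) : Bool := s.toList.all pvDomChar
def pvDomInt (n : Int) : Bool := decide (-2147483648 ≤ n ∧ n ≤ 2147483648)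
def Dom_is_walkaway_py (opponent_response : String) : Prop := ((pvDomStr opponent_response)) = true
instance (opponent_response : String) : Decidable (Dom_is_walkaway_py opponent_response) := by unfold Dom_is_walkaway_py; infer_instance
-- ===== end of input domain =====

-- B replaces A's 24 independent whole-string substring scans by ONE left-to-right scan of the
-- lowered text with a first-character dispatch table (same phrases, same result); objective:
-- alternative traversal, not claimed faster.

-- ===== PORT A =====
def walkawayPhrases : List String :=
  ["walk away", "walking away", "have to pass", "going to pass", "i'll pass",
   "i'm going to have to pass", "not going to work", "isn't going to work",
   "can't make this work", "too far apart", "explore other options",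
   "other options that work better", "pursue other opportunities", "look elsewhere",
   "end this conversation", "we're done here", "i'm done", "this conversation is over",
   "not interested anymore", "no longer interested", "withdrawing my offer",
   "rescind my offer", "off the table", "taking my business elsewhere"]

def is_walkaway_py (opponent_response : String) : Bool :=
  let lowered := PySem.Str.lower opponent_response
  walkawayPhrases.any (fun phrase => PySem.Str.isIn phrase lowered)

-- ===== PORT B =====
-- the module-level dict _WALKAWAY_BY_FIRST; its 1-character string keys are ported as Char
def walkawayByFirst : PySem.Dict Char (List String) :=
  PySem.Dict.mk
    [('w', ["walk away", "walking away", "we're done here", "withdrawing my offer"]),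
     ('h', ["have to pass"]),
     ('g', ["going to pass"]),
     ('i', ["i'll pass", "i'm going to have to pass", "isn't going to work", "i'm done"]),
     ('n', ["not going to work", "not interested anymore", "no longer interested"]),
     ('c', ["can't make this work"]),
     ('t', ["too far apart", "this conversation is over", "taking my business elsewhere"]),
     ('e', ["explore other options", "end this conversation"]),
     ('o', ["other options that work better", "off the table"]),
     ('p', ["pursue other opportunities"]),
     ('l', ["look elsewhere"]),
     ('r', ["rescind my offer"])]

-- the 'for i in range(len(lowered))' loop: position i ↔ the suffix lowered[i:];
-- 'lowered.startswith(phrase, i)' is exactly 'phrase.toList.isPrefixOf (that suffix)'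
def walkawayScan : List Char → Bool
  | [] => false
  | c :: rest =>
    ((PySem.Dict.getD walkawayByFirst c []).any (fun phrase => phrase.toList.isPrefixOf (c :: rest)))
      || walkawayScan rest

def is_walkaway_py_alt (opponent_response : String) : Bool :=
  let lowered := PySem.Str.lower opponent_response
  walkawayScan lowered.toList

-- ===== PRECONDITION & SPEC =====
def Spec_is_walkaway_py (opponent_response : String) (out : Bool) : Prop := out = is_walkaway_py_alt opponent_response
instance (opponent_response : String) (out : Bool) : Decidable (Spec_is_walkaway_py opponent_response out) := by unfold Spec_is_walkaway_py; infer_instance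

-- ===== CLAIM (what is proved, stated in full; the proofs are below) =====
def Claim_equal_is_walkaway_py : Prop := ∀ (opponent_response : String), Dom_is_walkaway_py opponent_response → Spec_is_walkaway_py opponent_response (is_walkaway_py opponent_response)

-- ===== LEMMAS AND PROOFS =====

-- 'sub in (c :: rest)': either sub starts right here, or it occurs in the rest
theorem isIn_cons_step (p : List Char) (c : Char) (rest : List Char) :
    PySem.Chars.isIn p (c :: rest) = (p.isPrefixOf (c :: rest) || PySem.Chars.isIn p rest) := by
  rw [Bool.eq_iff_iff]
  simp [PySem.Chars.isIn_iff_infix, List.infix_cons_iff, List.isPrefixOf_iff_prefix]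

theorem any_or_split {α : Type} (l : List α) (f g : α → Bool) :
    (l.any fun x => f x || g x) = (l.any f || l.any g) := by
  induction l with
  | nil => simp
  | cons a l ih =>
    simp only [List.any_cons, ih]
    cases f a <;> cases g a <;> cases l.any f <;> cases l.any g <;> rfl

-- at one position, checking only the first-character bucket checks exactly the phrases
-- that could match there
theorem bucket_any (c : Char) (rest : List Char) :
    ((PySem.Dict.getD walkawayByFirst c []).any
        (fun phrase => phrase.toList.isPrefixOf (c :: rest)))
      = walkawayPhrases.any (fun phrase => phrase.toList.isPrefixOf (c :: rest)) := by
  by_cases h1 : 'w' = c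
  · subst h1; simp [walkawayByFirst, walkawayPhrases, List.isPrefixOf, PySem.Dict.getD, PySem.Dict.get?]
  by_cases h2 : 'h' = c
  · subst h2; simp [walkawayByFirst, walkawayPhrases, List.isPrefixOf, PySem.Dict.getD, PySem.Dict.get?]
  by_cases h3 : 'g' = c
  · subst h3; simp [walkawayByFirst, walkawayPhrases, List.isPrefixOf, PySem.Dict.getD, PySem.Dict.get?]
  by_cases h4 : 'i' = c
  · subst h4; simp [walkawayByFirst, walkawayPhrases, List.isPrefixOf, PySem.Dict.getD, PySem.Dict.get?]
  by_cases h5 : 'n' = c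
  · subst h5; simp [walkawayByFirst, walkawayPhrases, List.isPrefixOf, PySem.Dict.getD, PySem.Dict.get?]
  by_cases h6 : 'c' = c
  · subst h6; simp [walkawayByFirst, walkawayPhrases, List.isPrefixOf, PySem.Dict.getD, PySem.Dict.get?]
  by_cases h7 : 't' = c
  · subst h7; simp [walkawayByFirst, walkawayPhrases, List.isPrefixOf, PySem.Dict.getD, PySem.Dict.get?]
  by_cases h8 : 'e' = c
  · subst h8; simp [walkawayByFirst, walkawayPhrases, List.isPrefixOf, PySem.Dict.getD, PySem.Dict.get?]
  by_cases h9 : 'o' = c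
  · subst h9; simp [walkawayByFirst, walkawayPhrases, List.isPrefixOf, PySem.Dict.getD, PySem.Dict.get?]
  by_cases h10 : 'p' = c
  · subst h10; simp [walkawayByFirst, walkawayPhrases, List.isPrefixOf, PySem.Dict.getD, PySem.Dict.get?]
  by_cases h11 : 'l' = c
  · subst h11; simp [walkawayByFirst, walkawayPhrases, List.isPrefixOf, PySem.Dict.getD, PySem.Dict.get?]
  by_cases h12 : 'r' = c
  · subst h12; simp [walkawayByFirst, walkawayPhrases, List.isPrefixOf, PySem.Dict.getD, PySem.Dict.get?]
  · have e1 : ('w' == c) = false := beq_eq_false_iff_ne.mpr h1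
    have e2 : ('h' == c) = false := beq_eq_false_iff_ne.mpr h2
    have e3 : ('g' == c) = false := beq_eq_false_iff_ne.mpr h3
    have e4 : ('i' == c) = false := beq_eq_false_iff_ne.mpr h4
    have e5 : ('n' == c) = false := beq_eq_false_iff_ne.mpr h5
    have e6 : ('c' == c) = false := beq_eq_false_iff_ne.mpr h6
    have e7 : ('t' == c) = false := beq_eq_false_iff_ne.mpr h7
    have e8 : ('e' == c) = false := beq_eq_false_iff_ne.mpr h8
    have e9 : ('o' == c) = false := beq_eq_false_iff_ne.mpr h9
    have e10 : ('p' == c) = false := beq_eq_false_iff_ne.mpr h10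
    have e11 : ('l' == c) = false := beq_eq_false_iff_ne.mpr h11
    have e12 : ('r' == c) = false := beq_eq_false_iff_ne.mpr h12
    simp [walkawayByFirst, walkawayPhrases, List.isPrefixOf, PySem.Dict.getD, PySem.Dict.get?,
          e1, e2, e3, e4, e5, e6, e7, e8, e9, e10, e11, e12]

-- the single bucketed scan computes the disjunction of all 24 substring tests
theorem walkawayScan_eq (cs : List Char) :
    walkawayScan cs = walkawayPhrases.any (fun phrase => PySem.Chars.isIn phrase.toList cs) := by
  induction cs with
  | nil => decide
  | cons c rest ih =>
    have : (walkawayPhrases.any fun phrase => PySem.Chars.isIn phrase.toList (c :: rest))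
        = (walkawayPhrases.any (fun phrase => phrase.toList.isPrefixOf (c :: rest))
            || walkawayPhrases.any (fun phrase => PySem.Chars.isIn phrase.toList rest)) := by
      rw [← any_or_split]
      simp only [isIn_cons_step]
    rw [this, walkawayScan, ← ih, bucket_any]

-- ===== VERDICT (by name: the statement is the Claim_ definition above) =====
theorem is_walkaway_py_spec : Claim_equal_is_walkaway_py := by
  intro s _
  unfold Spec_is_walkaway_py is_walkaway_py is_walkaway_py_alt
  simp only [PySem.Str.isIn_eq]
  exact (walkawayScan_eq (PySem.Str.lower s).toList).symm
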